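-- pv_equiv track=rewrite | github.com/Kydryavcev/magma_cipher | apps/cryptolab_util.py | corrEffective
-- ===== SOURCE A (Python) =====
-- def corrEffective(ua):
--     res = []
--     for j in range(0, len(ua[0])):
--         count = 0
--         for i in range(0, len(ua)):
--             if ua[i][j] == 0:
--                 count += 1
--         if count >= len(ua) / 2:
--             res.append(j)
--     return res
-- ===== SOURCE B (Python) =====
-- def corrEffective(ua):
--     m = len(ua[0])
--     n = len(ua)
--     nonzeros = {}
--     for row in ua:
--         for j in range(m):
--             if row[j] != 0:
--                 nonzeros[j] = nonzeros.get(j, 0) + 1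
--     half = n / 2
--     return [j for j in range(m) if nonzeros.get(j, 0) <= half]
-- ===== Notes on version B (the rewrite author's own statement) =====
-- stated objective: alternative
-- what changed: B counts the NONZERO cells of each column sparsely into a dict and keeps a column when its nonzero count is at most half the rows (the exact complement of A's zero-count test), instead of A's per-column rescan of all rows counting zeros.
import Mathlib
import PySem

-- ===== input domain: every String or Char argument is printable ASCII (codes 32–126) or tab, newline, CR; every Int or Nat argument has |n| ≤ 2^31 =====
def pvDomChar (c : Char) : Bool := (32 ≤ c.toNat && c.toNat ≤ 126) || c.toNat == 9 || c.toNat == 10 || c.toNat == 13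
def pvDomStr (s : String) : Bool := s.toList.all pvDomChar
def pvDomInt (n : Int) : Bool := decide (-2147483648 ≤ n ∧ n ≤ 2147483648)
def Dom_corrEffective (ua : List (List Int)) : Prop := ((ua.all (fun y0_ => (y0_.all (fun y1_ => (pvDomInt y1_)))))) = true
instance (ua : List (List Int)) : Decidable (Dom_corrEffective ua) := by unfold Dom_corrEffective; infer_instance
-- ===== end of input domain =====

-- B counts the NONZERO cells column-wise into a sparse dict and keeps a column when its
-- nonzero count is at most half the rows — the exact complement of A's zero-count rescan
-- per column (zeros >= n/2  iff  nonzeros <= n/2, since zeros + nonzeros = n).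
-- In both ports the float comparison with `len(ua)/2` is rendered with integers
-- (`n ≤ 2*count`, resp. `2*count ≤ n`), exact since both sides are exact in float here.

-- ===== PORT A =====
def corrEffective (ua : List (List Int)) : List Int :=
  (PySem.List.pyRange 0 (((PySem.List.pyGet? ua 0).getD []).length : Int) 1).foldl
    (fun res j =>
      let count : Int := (PySem.List.pyRange 0 (ua.length : Int) 1).foldl
        (fun count i =>
          if PySem.List.pyGetD (PySem.List.pyGetD ua i []) j 1 = 0 then count + 1 else count) 0
      if (ua.length : Int) ≤ 2 * count then res ++ [j] else res) []

-- ===== PORT B =====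
def corrEffective_alt (ua : List (List Int)) : List Int :=
  let m := ((PySem.List.pyGet? ua 0).getD []).length
  let n : Int := ua.length
  let nonzeros : PySem.Dict Int Int := ua.foldl
    (fun d row =>
      (PySem.List.pyRange 0 (m : Int) 1).foldl
        (fun d j =>
          if PySem.List.pyGetD row j 1 ≠ 0 then d.insert j (d.getD j 0 + 1) else d) d)
    PySem.Dict.empty
  (PySem.List.pyRange 0 (m : Int) 1).filter
    (fun j => decide (2 * nonzeros.getD j 0 ≤ n))

-- ===== PRECONDITION & SPEC =====
-- Pre_ excludes exactly the inputs where Python A raises IndexError: the empty matrix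
-- (ua[0] fails) and matrices with a row shorter than the first row (ua[i][j] fails).
def Pre_corrEffective (ua : List (List Int)) : Prop :=
  ua ≠ [] ∧ ∀ row ∈ ua, (ua.headD []).length ≤ row.length
instance (ua : List (List Int)) : Decidable (Pre_corrEffective ua) := by
  unfold Pre_corrEffective; infer_instance

def pvWitness_corrEffective : List (List Int) := [[0, 1], [0, 0], [1, 1]]

def Spec_corrEffective (ua : List (List Int)) (out : List Int) : Prop := out = corrEffective_alt ua
instance (ua : List (List Int)) (out : List Int) : Decidable (Spec_corrEffective ua out) := by unfold Spec_corrEffective; infer_instance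

-- ===== CLAIM (what is proved, stated in full; the proofs are below) =====
def Claim_equal_corrEffective : Prop := ∀ (ua : List (List Int)), Dom_corrEffective ua → Pre_corrEffective ua → Spec_corrEffective ua (corrEffective ua)

-- ===== LEMMAS AND PROOFS =====

-- zero count of column j (value of A's inner loop)
def pvZeroCnt (ua : List (List Int)) (j : Int) : Int :=
  ua.foldl (fun c row => if PySem.List.pyGetD row j 1 = 0 then c + 1 else c) 0

-- nonzero count of column j
def pvNzCnt (ua : List (List Int)) (j : Int) : Int :=
  ua.foldl (fun c row => if PySem.List.pyGetD row j 1 ≠ 0 then c + 1 else c) 0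

theorem pvCnt_shift (p : List Int → Prop) [DecidablePred p] (ua : List (List Int)) (c : Int) :
    ua.foldl (fun c row => if p row then c + 1 else c) c
      = c + ua.foldl (fun c row => if p row then c + 1 else c) 0 := by
  induction ua generalizing c with
  | nil => simp
  | cons r t ih =>
    simp only [List.foldl_cons]
    rw [ih, ih (if p r then (0:Int) + 1 else 0)]
    split_ifs <;> ring

theorem pvZero_add_nz (ua : List (List Int)) (j : Int) :
    pvZeroCnt ua j + pvNzCnt ua j = ua.length := by
  induction ua with
  | nil => simp [pvZeroCnt, pvNzCnt]
  | cons r t ih =>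
    simp only [pvZeroCnt, pvNzCnt, List.foldl_cons, List.length_cons] at ih ⊢
    rw [pvCnt_shift (fun row => PySem.List.pyGetD row j 1 = 0) t
          (if PySem.List.pyGetD r j 1 = 0 then (0:Int) + 1 else 0),
        pvCnt_shift (fun row => PySem.List.pyGetD row j 1 ≠ 0) t
          (if PySem.List.pyGetD r j 1 ≠ 0 then (0:Int) + 1 else 0)]
    by_cases h : PySem.List.pyGetD r j 1 = 0
    · rw [if_pos h, if_neg (not_not.mpr h)]
      push_cast
      linarith [ih]
    · rw [if_neg h, if_pos h]
      push_cast
      linarith [ih]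

-- a conditional counting loop over keys is counting over the filtered key list
theorem pvGetD_foldl_cond (p : Int → Bool) (l : List Int) (d : PySem.Dict Int Int) (v : Int) :
    (l.foldl (fun d x => if p x then d.insert x (d.getD x 0 + 1) else d) d).getD v 0
      = d.getD v 0 + ((l.filter p).count v : Int) := by
  induction l generalizing d with
  | nil => simp
  | cons x t ih =>
    simp only [List.foldl_cons, List.filter_cons]
    by_cases hp : p x
    · simp only [hp, if_pos, ih]
      rw [PySem.Dict.getD_insert]
      by_cases hv : v = x <;> simp [hv, List.count_cons] <;> omega
    · simp [hp, ih]

-- value looked up in B's dict = nonzero count of the column, for 0 ≤ j < m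
theorem pvDict_getD (ua : List (List Int)) (m : Nat) (d : PySem.Dict Int Int) (j : Int)
    (h0 : 0 ≤ j) (hm : j < (m : Int)) :
    (ua.foldl
      (fun d row =>
        (PySem.List.pyRange 0 (m : Int) 1).foldl
          (fun d j =>
            if PySem.List.pyGetD row j 1 ≠ 0 then d.insert j (d.getD j 0 + 1) else d) d)
      d).getD j 0 = d.getD j 0 + pvNzCnt ua j := by
  induction ua generalizing d with
  | nil => simp [pvNzCnt]
  | cons r t ih =>
    simp only [List.foldl_cons, pvNzCnt] at ih ⊢
    rw [ih]
    have hrow : ((PySem.List.pyRange 0 (m : Int) 1).foldl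
        (fun d j =>
          if PySem.List.pyGetD r j 1 ≠ 0 then d.insert j (d.getD j 0 + 1) else d) d).getD j 0
        = d.getD j 0 + if PySem.List.pyGetD r j 1 ≠ 0 then 1 else 0 := by
      have := pvGetD_foldl_cond (fun x => decide (PySem.List.pyGetD r x 1 ≠ 0))
        (PySem.List.pyRange 0 (m : Int) 1) d j
      simp only [decide_eq_true_eq] at this
      rw [this]
      have hcnt : ((PySem.List.pyRange 0 (m : Int) 1).filter
          (fun x => decide (PySem.List.pyGetD r x 1 ≠ 0))).count j
          = if PySem.List.pyGetD r j 1 ≠ 0 then 1 else 0 := by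
        by_cases hnz : PySem.List.pyGetD r j 1 ≠ 0
        · rw [if_pos hnz]
          rw [List.count_eq_one_of_mem]
          · exact List.Nodup.filter _ (PySem.List.nodup_pyRange_one 0 (m:Int))
          · rw [List.mem_filter]
            exact ⟨(PySem.List.mem_pyRange_one).2 ⟨h0, hm⟩, by simp [hnz]⟩
        · rw [if_neg hnz, List.count_eq_zero]
          intro hmem
          rcases List.mem_filter.1 hmem with ⟨_, hc⟩
          simp at hc
          exact hnz hc
      rw [hcnt]
      split_ifs <;> simp
    rw [hrow, pvCnt_shift (fun row => PySem.List.pyGetD row j 1 ≠ 0) t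
      (if PySem.List.pyGetD r j 1 ≠ 0 then (0:Int) + 1 else 0)]
    split_ifs <;> ring
  
theorem pvInner_eq_zeroCnt (ua : List (List Int)) (j : Int) :
    (PySem.List.pyRange 0 (ua.length : Int) 1).foldl
      (fun count i =>
        if PySem.List.pyGetD (PySem.List.pyGetD ua i []) j 1 = 0 then count + 1 else count) 0
      = pvZeroCnt ua j := by
  exact PySem.List.foldl_pyRange_zero_pyGetD' ua []
    (fun count row => if PySem.List.pyGetD row j 1 = 0 then count + 1 else count) 0

theorem corrEffective_eq (ua : List (List Int)) : corrEffective ua = corrEffective_alt ua := by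
  unfold corrEffective corrEffective_alt
  simp only []
  rw [PySem.List.foldl_append_ite_eq_filter]
  simp only [List.nil_append]
  apply List.filter_congr
  intro j hj
  obtain ⟨h0, hm⟩ := (PySem.List.mem_pyRange_one).1 hj
  rw [pvInner_eq_zeroCnt,
      pvDict_getD ua (((PySem.List.pyGet? ua 0).getD []).length) PySem.Dict.empty j h0 hm]
  simp only [PySem.Dict.getD_empty, zero_add, decide_eq_decide]
  have := pvZero_add_nz ua j
  omega

-- ===== VERDICT (by name: the statement is the Claim_ definition above) =====
theorem corrEffective_spec : Claim_equal_corrEffective := by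
  intro ua _ _
  unfold Spec_corrEffective
  exact corrEffective_eq ua
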